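-- pv_equiv track=rewrite | github.com/openenclave/openenclave | scripts/lvi-mitigation/lvi-mitigation.py | get_src_index
-- ===== SOURCE A (Python) =====
-- def get_src_index(options):
--     src_index = -1
--     for i in range(0,len(options)):
--         if options[i] == '-s':
--             if(src_index != -1):
--                 print ('source files conflict')
--                 exit(-1)
--             src_index = i+1
--     if src_index == -1:
--         print ('cannot find the source file')
--         exit(-1)
--     return src_index
-- ===== SOURCE B (Python) =====
-- def get_src_index(options):
--     cnt = options.count('-s')
--     if cnt == 0:
--         print ('cannot find the source file')
--         exit(-1)
--     if cnt > 1: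
--         print ('source files conflict')
--         exit(-1)
--     return options.index('-s') + 1
-- ===== Notes on version B (the rewrite author's own statement) =====
-- stated objective: simpler
-- what changed: Replaces the index loop maintaining a running src_index sentinel with a count-then-locate decomposition: count '-s' once to decide both error cases up front, then a single index lookup gives the answer; no loop-carried state.
import Mathlib
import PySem

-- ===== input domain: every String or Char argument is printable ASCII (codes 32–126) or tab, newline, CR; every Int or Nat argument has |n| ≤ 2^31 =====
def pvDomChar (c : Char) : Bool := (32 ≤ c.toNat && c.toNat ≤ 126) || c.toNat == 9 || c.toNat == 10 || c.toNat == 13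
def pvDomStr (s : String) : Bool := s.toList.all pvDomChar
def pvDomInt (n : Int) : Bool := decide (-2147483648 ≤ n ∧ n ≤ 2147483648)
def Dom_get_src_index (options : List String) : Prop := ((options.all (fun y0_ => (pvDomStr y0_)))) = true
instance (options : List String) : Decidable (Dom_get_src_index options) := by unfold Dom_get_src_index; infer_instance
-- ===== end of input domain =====

-- ===== PORT A =====
-- B replaces A's index loop with a count-then-locate decomposition (objective: simpler).
-- Both exit(-1) paths (no '-s' / more than one '-s') are outside Pre_; the ports return -1 there.
def pvSrcLoop : List String → Int → Int → Int
  | [], _, src_index => src_index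
  | o :: rest, i, src_index =>
    if o == "-s" then
      if src_index ≠ -1 then -1  -- print 'source files conflict'; exit(-1)
      else pvSrcLoop rest (i + 1) (i + 1)
    else pvSrcLoop rest (i + 1) src_index

def get_src_index (options : List String) : Int :=
  pvSrcLoop options 0 (-1)
  -- post-loop: if src_index == -1 then print 'cannot find the source file'; exit(-1) — it already IS -1 there

-- ===== PORT B =====
def get_src_index_alt (options : List String) : Int :=
  let cnt := PySem.List.count options "-s"
  if cnt = 0 then -1        -- print 'cannot find the source file'; exit(-1)
  else if cnt > 1 then -1   -- print 'source files conflict'; exit(-1)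
  else
    match PySem.List.index? options "-s" with
    | some i => (i : Int) + 1
    | none => -1            -- unreachable: cnt = 1

-- ===== PRECONDITION & SPEC =====
-- Pre_: exactly the inputs on which A returns (otherwise A prints an error and exits).
def Pre_get_src_index (options : List String) : Prop := PySem.List.count options "-s" = 1
instance (options : List String) : Decidable (Pre_get_src_index options) := by unfold Pre_get_src_index; infer_instance
def pvWitness_get_src_index : List String := ["gcc", "-s", "a.c"]
def Spec_get_src_index (options : List String) (out : Int) : Prop := out = get_src_index_alt options
instance (options : List String) (out : Int) : Decidable (Spec_get_src_index options out) := by unfold Spec_get_src_index; infer_instance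

-- ===== CLAIM (what is proved, stated in full; the proofs are below) =====
def Claim_equal_get_src_index : Prop := ∀ (options : List String), Dom_get_src_index options → Pre_get_src_index options → Spec_get_src_index options (get_src_index options)

-- ===== LEMMAS AND PROOFS =====
theorem pvSrcLoop_no_hit (l : List String) (h : l.count "-s" = 0) :
    ∀ (i s : Int), pvSrcLoop l i s = s := by
  induction l with
  | nil => intro i s; rfl
  | cons o rest ih =>
    intro i s
    rw [List.count_cons] at h
    by_cases ho : o = "-s"
    · simp [ho] at h
    · simp [ho] at h
      simpa [pvSrcLoop, ho] using ih h (i + 1) s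

theorem pvSrcLoop_one_hit (l : List String) (h : l.count "-s" = 1) :
    ∀ (i : Int), pvSrcLoop l i (-1) = i + ((l.idxOf? "-s").getD 0 : Nat) + 1 := by
  induction l with
  | nil => simp at h
  | cons o rest ih =>
    intro i
    rw [List.count_cons] at h
    by_cases ho : o = "-s"
    · simp [ho] at h
      have := pvSrcLoop_no_hit rest h (i + 1) (i + 1)
      simp [pvSrcLoop, ho, this, List.idxOf?_cons]
    · simp [ho] at h
      have hmem : "-s" ∈ rest := List.count_pos_iff.mp (by omega)
      obtain ⟨k, hk⟩ := List.isSome_idxOf?.mpr hmem |> Option.isSome_iff_exists.mp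
      have := ih h (i + 1)
      simp [pvSrcLoop, ho, List.idxOf?_cons, hk] at this ⊢
      omega

-- ===== VERDICT (by name: the statement is the Claim_ definition above) =====
theorem get_src_index_spec : Claim_equal_get_src_index := by
  intro options _ hpre
  unfold Pre_get_src_index at hpre
  rw [PySem.List.count_eq] at hpre
  unfold Spec_get_src_index get_src_index get_src_index_alt
  have hmem : "-s" ∈ options := List.count_pos_iff.mp (by omega)
  obtain ⟨k, hk⟩ := List.isSome_idxOf?.mpr hmem |> Option.isSome_iff_exists.mp
  have hloop := pvSrcLoop_one_hit options hpre 0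
  rw [PySem.List.count_eq, hpre]
  simp [PySem.List.index?_eq_idxOf?, hk] at hloop ⊢
  omega
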